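-- pv_equiv track=rewrite | github.com/trl-lab/SQaLe-Text-to-SQL-Generation | ReFoRCE/utils.py | best_table_match
-- ===== SOURCE A (Python) =====
-- from typing import Any, List, Optional, Sequence, Tuple
--
-- def best_table_match(tables: Sequence[str], table_cols: dict[str, list[str]], toks: Sequence[str]) -> Optional[str]:
--     if not tables:
--         return None
--     scores = []
--     tokset = set(toks)
--     for t in tables:
--         s = 0
--         tl = t.lower()
--         s += sum(1 for tok in tokset if tok in tl)
--         s += sum(1 for c in table_cols.get(t, []) for tok in tokset if tok in c.lower())
--         scores.append((s, t))
--     scores.sort(reverse=True)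
--     return scores[0][1] if scores and scores[0][0] > 0 else tables[0]
-- ===== SOURCE B (Python) =====
-- def best_table_match(tables, table_cols, toks):
--     if not tables:
--         return None
--     tokset = set(toks)
--
--     def score(t):
--         tl = t.lower()
--         s = sum(1 for tok in tokset if tok in tl)
--         s += sum(1 for c in table_cols.get(t, []) for tok in tokset if tok in c.lower())
--         return s
--
--     best_s, best_t = -1, ""
--     for t in tables:
--         s = score(t)
--         if (s, t) > (best_s, best_t):
--             best_s, best_t = s, t
--     return best_t if best_s > 0 else tables[0]
-- ===== Notes on version B (the rewrite author's own statement) =====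
-- stated objective: simpler
-- what changed: B drops the intermediate scores list and the reverse tuple sort, tracking the running best (score, table) pair in one pass with Python tuple comparison (so ties still go to the lexicographically largest name).
import Mathlib
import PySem

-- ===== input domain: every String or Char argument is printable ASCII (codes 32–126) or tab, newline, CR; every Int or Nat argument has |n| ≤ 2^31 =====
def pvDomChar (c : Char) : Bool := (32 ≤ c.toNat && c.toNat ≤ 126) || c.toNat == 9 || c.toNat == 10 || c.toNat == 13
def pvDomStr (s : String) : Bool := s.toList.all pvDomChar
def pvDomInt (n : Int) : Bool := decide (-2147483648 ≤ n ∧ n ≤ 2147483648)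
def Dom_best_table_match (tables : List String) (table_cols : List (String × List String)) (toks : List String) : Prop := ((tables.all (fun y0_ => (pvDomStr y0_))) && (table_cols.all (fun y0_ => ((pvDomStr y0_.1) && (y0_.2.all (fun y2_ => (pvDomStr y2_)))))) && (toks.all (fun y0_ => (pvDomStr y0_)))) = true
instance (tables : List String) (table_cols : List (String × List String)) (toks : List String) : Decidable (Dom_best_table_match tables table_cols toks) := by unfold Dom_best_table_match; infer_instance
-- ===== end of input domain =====

-- B replaces A's scores list + reverse tuple sort by a single pass keeping the best (score, table)
-- pair under Python tuple comparison; objective: simpler (no intermediate list, no sort).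

-- ===== PORT A =====
def best_table_match (tables : List String) (table_cols : List (String × List String)) (toks : List String) : Option String :=
  if tables = [] then none
  else
    let tokset := PySem.Set.ofList toks
    let scores := tables.foldl (fun acc t =>
      let tl := PySem.Str.lower t
      let s : Int :=
        (tokset.map (fun tok => if PySem.Str.isIn tok tl then (1 : Int) else 0)).sum
        + (((PySem.Dict.mk table_cols).getD t []).map (fun c =>
            (tokset.map (fun tok => if PySem.Str.isIn tok (PySem.Str.lower c) then (1 : Int) else 0)).sum)).sum
      acc ++ [(s, t)]) ([] : List (Int × String))
    match PySem.List.sorted2 scores (fun x => x.1) (fun x => x.2) true with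
    | (s, t) :: _ => if s > 0 then some t else tables.head?
    | [] => tables.head?

-- ===== PORT B =====
-- B's helper `score(t)`
def pvScore (table_cols : List (String × List String)) (tokset : List String) (t : String) : Int :=
  let tl := PySem.Str.lower t
  (tokset.map (fun tok => if PySem.Str.isIn tok tl then (1 : Int) else 0)).sum
  + (((PySem.Dict.mk table_cols).getD t []).map (fun c =>
      (tokset.map (fun tok => if PySem.Str.isIn tok (PySem.Str.lower c) then (1 : Int) else 0)).sum)).sum

-- Python tuple comparison `a > b` on (int, str) pairs
def pvTupGt (a b : Int × String) : Bool :=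
  decide (b.1 < a.1) || (!decide (a.1 < b.1) && decide (b.2 < a.2))

def best_table_match_alt (tables : List String) (table_cols : List (String × List String)) (toks : List String) : Option String :=
  match tables with
  | [] => none
  | t0 :: _ =>
    let tokset := PySem.Set.ofList toks
    let best := tables.foldl (fun best t =>
        let s := pvScore table_cols tokset t
        if pvTupGt (s, t) best then (s, t) else best) ((-1 : Int), "")
    if best.1 > 0 then some best.2 else some t0

-- ===== PRECONDITION & SPEC =====
def Spec_best_table_match (tables : List String) (table_cols : List (String × List String)) (toks : List String) (out : Option String) : Prop := out = best_table_match_alt tables table_cols toks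
instance (tables : List String) (table_cols : List (String × List String)) (toks : List String) (out : Option String) : Decidable (Spec_best_table_match tables table_cols toks out) := by unfold Spec_best_table_match; infer_instance

-- ===== CLAIM (what is proved, stated in full; the proofs are below) =====
def Claim_equal_best_table_match : Prop := ∀ (tables : List String) (table_cols : List (String × List String)) (toks : List String), Dom_best_table_match tables table_cols toks → Spec_best_table_match tables table_cols toks (best_table_match tables table_cols toks)

-- ===== LEMMAS AND PROOFS =====

theorem pvScore_nonneg (tc : List (String × List String)) (ts : List String) (t : String) :
    0 ≤ pvScore tc ts t := by
  unfold pvScore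
  dsimp only
  have h1 : (0:Int) ≤ (ts.map (fun tok => if PySem.Str.isIn tok (PySem.Str.lower t) then (1 : Int) else 0)).sum := by
    apply List.sum_nonneg; intro x hx
    simp only [List.mem_map] at hx
    obtain ⟨tok, _, rfl⟩ := hx
    split <;> norm_num
  have h2 : (0:Int) ≤ (((PySem.Dict.mk tc).getD t []).map (fun c =>
      (ts.map (fun tok => if PySem.Str.isIn tok (PySem.Str.lower c) then (1 : Int) else 0)).sum)).sum := by
    apply List.sum_nonneg; intro x hx
    simp only [List.mem_map] at hx
    obtain ⟨c, _, rfl⟩ := hx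
    apply List.sum_nonneg; intro y hy
    simp only [List.mem_map] at hy
    obtain ⟨tok, _, rfl⟩ := hy
    split <;> norm_num
  exact add_nonneg h1 h2

theorem insertBy_cons {α : Type} (before : α → α → Bool) (x h : α) (t : List α) :
    PySem.List.insertBy before x (h :: t)
      = if before x h then x :: h :: t else h :: PySem.List.insertBy before x t := rfl

theorem head_foldl_insertBy {α : Type} (before : α → α → Bool) (xs : List α) (h : α) (t : List α) :
    (xs.foldl (fun acc x => PySem.List.insertBy before x acc) (h :: t)).head?
      = some (xs.foldl (fun m x => if before x m then x else m) h) := by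
  induction xs generalizing h t with
  | nil => rfl
  | cons x xs ih =>
    simp only [List.foldl_cons, insertBy_cons]
    by_cases hb : before x h = true
    · simp only [hb, if_true]
      exact ih x (h :: t)
    · simp only [hb, if_false, Bool.false_eq_true]
      exact ih h _

theorem sorted2_rev_eq_foldl (xs : List (Int × String)) :
    PySem.List.sorted2 xs (fun x => x.1) (fun x => x.2) true
      = xs.foldl (fun acc x => PySem.List.insertBy pvTupGt x acc) [] := rfl

theorem best_table_match_spec_aux (tables : List String) (table_cols : List (String × List String)) (toks : List String) :
    best_table_match tables table_cols toks = best_table_match_alt tables table_cols toks := by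
  cases tables with
  | nil => rfl
  | cons t0 rest =>
    unfold best_table_match best_table_match_alt
    simp only [reduceCtorEq, if_false]
    set ts := PySem.Set.ofList toks with hts
    set f : String → Int × String := fun t => (pvScore table_cols ts t, t) with hf
    -- A's scores list is tables.map f
    have hscores : (t0 :: rest).foldl (fun acc t =>
        let tl := PySem.Str.lower t
        let s : Int :=
          (ts.map (fun tok => if PySem.Str.isIn tok tl then (1 : Int) else 0)).sum
          + (((PySem.Dict.mk table_cols).getD t []).map (fun c =>
              (ts.map (fun tok => if PySem.Str.isIn tok (PySem.Str.lower c) then (1 : Int) else 0)).sum)).sum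
        acc ++ [(s, t)]) ([] : List (Int × String)) = (t0 :: rest).map f := by
      rw [PySem.List.foldl_append_singleton_eq_map]
      simp only [List.nil_append]
      rfl
    rw [hscores]
    -- the head of A's reverse-sorted list is the fold-max
    have hmax : (PySem.List.sorted2 ((t0 :: rest).map f) (fun x => x.1) (fun x => x.2) true).head?
        = some ((rest.map f).foldl (fun m x => if pvTupGt x m then x else m) (f t0)) := by
      rw [sorted2_rev_eq_foldl]
      simp only [List.map_cons, List.foldl_cons]
      exact head_foldl_insertBy pvTupGt (rest.map f) (f t0) []
    -- B's fold equals the same fold-max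
    have hb : (t0 :: rest).foldl (fun best t =>
        let s := pvScore table_cols ts t
        if pvTupGt (s, t) best then (s, t) else best) ((-1 : Int), "")
        = (rest.map f).foldl (fun m x => if pvTupGt x m then x else m) (f t0) := by
      simp only [List.foldl_cons]
      have hfirst : (if pvTupGt (pvScore table_cols ts t0, t0) ((-1 : Int), "") then (pvScore table_cols ts t0, t0) else ((-1 : Int), "")) = f t0 := by
        have := pvScore_nonneg table_cols ts t0
        have : pvTupGt (pvScore table_cols ts t0, t0) ((-1 : Int), "") = true := by
          simp only [pvTupGt, Bool.or_eq_true, decide_eq_true_eq]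
          left; omega
        simp [this, hf]
      rw [hfirst, List.foldl_map]
    rw [hb]
    -- both now reduce to the same pair
    cases hss : PySem.List.sorted2 ((t0 :: rest).map f) (fun x => x.1) (fun x => x.2) true with
    | nil => rw [hss] at hmax; simp at hmax
    | cons p tl =>
      rw [hss] at hmax
      simp only [List.head?_cons, Option.some.injEq] at hmax
      cases p with
      | mk s t =>
        rw [← hmax]
        rfl

-- ===== VERDICT (by name: the statement is the Claim_ definition above) =====
theorem best_table_match_spec : Claim_equal_best_table_match := by
  intro tables table_cols toks _
  exact best_table_match_spec_aux tables table_cols toks
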